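-- pv_equiv track=rewrite | github.com/ssshier/algorithms | nowcoder-hw/HJ026-字符串排序.py | solve
-- ===== SOURCE A (Python) =====
-- def solve(st):
--     az = []
--     res = []
--     for char in st:
--         if char.isalpha():
--             az.append(char)
--         res.append(char)
--     az.sort(key=lambda x: x.lower())
--     i = 0
--     for index, char in enumerate(res):
--         if char.isalpha():
--             res[index] = az[i]
--             i += 1
--
--     return ''.join(res)
-- ===== SOURCE B (Python) =====
-- def solve(st):
--     # Stable bucket ordering over the 26 lowercase keys instead of a comparison sort.
--     letters = [c for c in st if c.isalpha()]
--     ordered = []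
--     for k in range(26):
--         key = chr(97 + k)
--         ordered.extend(c for c in letters if c.lower() == key)
--     it = iter(ordered)
--     return ''.join(next(it) if c.isalpha() else c for c in st)
-- ===== Notes on version B (the rewrite author's own statement) =====
-- stated objective: alternative
-- what changed: Replaces the comparison sort of the letters by a stable 26-bucket pass (one filter per lowercase key, concatenated in alphabetical order) and rebuilds the string by consuming that ordered stream, instead of sorting and index-assigning into a mutable list.
import Mathlib
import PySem

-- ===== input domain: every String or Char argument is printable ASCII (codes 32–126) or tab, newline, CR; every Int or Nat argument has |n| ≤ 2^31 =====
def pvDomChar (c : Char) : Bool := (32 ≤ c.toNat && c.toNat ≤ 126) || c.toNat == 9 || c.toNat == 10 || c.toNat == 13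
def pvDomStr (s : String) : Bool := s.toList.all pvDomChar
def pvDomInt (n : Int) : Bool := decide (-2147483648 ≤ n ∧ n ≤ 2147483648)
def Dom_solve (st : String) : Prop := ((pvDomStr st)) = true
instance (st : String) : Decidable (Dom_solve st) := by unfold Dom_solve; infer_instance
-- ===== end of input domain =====

-- B replaces A's comparison sort of the letters by a stable 26-bucket pass (one filter per lowercase key, in
-- alphabetical order) and rebuilds the string by consuming that ordered stream (alternative algorithm, same results).

-- ===== PORT A =====
-- key=lambda x: x.lower() compares one-character strings; on single chars that is exactly lowerChar under Char's order.
def solve (st : String) : String :=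
  let p := st.toList.foldl (fun (s : List Char × List Char) c =>
      ((if PySem.Chars.isalpha c then s.1 ++ [c] else s.1), s.2 ++ [c])) ([], [])
  let az := PySem.List.sorted p.1 (fun c => PySem.Chars.lowerChar c) false
  let q := (PySem.List.enumerate p.2 0).foldl (fun (s : List Char × Int) ic =>
      if PySem.Chars.isalpha ic.2 then
        (PySem.List.pySetD s.1 ic.1 (PySem.List.pyGetD az s.2 ' '), s.2 + 1)
      else s) (p.2, 0)
  String.ofList q.1

-- ===== PORT B =====
-- ''.join(next(it) if c.isalpha() else c for c in st): consume the ordered letters at the alpha positions.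
def solveMergeB : List Char → List Char → List Char
  | [], _ => []
  | c :: cs, ord =>
    if PySem.Chars.isalpha c then
      match ord with
      | o :: os => o :: solveMergeB cs os
      | [] => []        -- unreachable (the stream has exactly as many letters as there are alpha positions)
    else c :: solveMergeB cs ord

def solve_alt (st : String) : String :=
  let letters := st.toList.filter (fun c => PySem.Chars.isalpha c)
  let ordered := (PySem.List.pyRange 0 26 1).foldl
      (fun acc k => acc ++ letters.filter (fun c => PySem.Chars.lowerChar c = Char.ofNat (97 + k).toNat)) []
  String.ofList (solveMergeB st.toList ordered)

-- ===== PRECONDITION & SPEC =====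
def Spec_solve (st : String) (out : String) : Prop := out = solve_alt st
instance (st : String) (out : String) : Decidable (Spec_solve st out) := by unfold Spec_solve; infer_instance

-- ===== CLAIM (what is proved, stated in full; the proofs are below) =====
def Claim_equal_solve : Prop := ∀ (st : String), Dom_solve st → Spec_solve st (solve st)

-- ===== LEMMAS AND PROOFS =====

-- the 26 lowercase keys, in alphabetical order
def lcKeys : List Char := ['a','b','c','d','e','f','g','h','i','j','k','l','m','n','o','p','q','r','s','t','u','v','w','x','y','z']

lemma mem_lcKeys_of_range (d : Char) (h1 : 97 ≤ d.toNat) (h2 : d.toNat ≤ 122) : d ∈ lcKeys := by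
  have hd : d = Char.ofNat d.toNat := (Char.ofNat_toNat d).symm
  rw [hd]
  interval_cases h : d.toNat <;> decide

lemma lower_mem_lcKeys (c : Char) (h : PySem.Chars.isalpha c = true) :
    PySem.Chars.lowerChar c ∈ lcKeys := by
  simp only [PySem.Chars.isalpha, PySem.Chars.isupper, PySem.Chars.islower, Bool.or_eq_true,
    Bool.and_eq_true, decide_eq_true_eq] at h
  unfold PySem.Chars.lowerChar PySem.Chars.isupper
  by_cases hu : (65:Nat) ≤ c.toNat ∧ c.toNat ≤ 90
  · have : (decide ('A' ≤ c) && decide (c ≤ 'Z')) = true := by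
      simp only [Bool.and_eq_true, decide_eq_true_eq]
      exact ⟨hu.1, hu.2⟩
    rw [if_pos this]
    apply mem_lcKeys_of_range
    · rw [Char.toNat_ofNat, if_pos (Or.inl (by omega))]; omega
    · rw [Char.toNat_ofNat, if_pos (Or.inl (by omega))]; omega
  · have hc : (97:Nat) ≤ c.toNat ∧ c.toNat ≤ 122 := by
      rcases h with ⟨h1, h2⟩ | ⟨h1, h2⟩
      · exact absurd ⟨h1, h2⟩ hu
      · exact ⟨h1, h2⟩
    have : (decide ('A' ≤ c) && decide (c ≤ 'Z')) = false := by
      simp only [Bool.and_eq_false_iff, decide_eq_false_iff_not]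
      right; show ¬ (c.toNat ≤ 90); omega
    rw [if_neg (by simp [this])]
    exact mem_lcKeys_of_range c hc.1 hc.2

-- A's first loop builds (the alpha chars, a copy of the input) as a pair
lemma pairA (l : List Char) (a b : List Char) :
    l.foldl (fun (s : List Char × List Char) c =>
      ((if PySem.Chars.isalpha c then s.1 ++ [c] else s.1), s.2 ++ [c])) (a, b)
    = (a ++ l.filter (fun c => PySem.Chars.isalpha c), b ++ l) := by
  induction l generalizing a b with
  | nil => simp
  | cons c cs ih =>
      simp only [List.foldl_cons, List.filter_cons, ih]
      by_cases h : PySem.Chars.isalpha c = true <;> simp [h]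

-- insertBy walks past a prefix it is not before
lemma insertBy_append_not {α : Type} (before : α → α → Bool) (x : α) (l1 l2 : List α)
    (h : ∀ y ∈ l1, before x y = false) :
    PySem.List.insertBy before x (l1 ++ l2) = l1 ++ PySem.List.insertBy before x l2 := by
  induction l1 with
  | nil => simp
  | cons y ys ih =>
      have hy := h y (by simp)
      simp [PySem.List.insertBy, hy, ih (fun z hz => h z (by simp [hz]))]

lemma insertBy_all_before {α : Type} (before : α → α → Bool) (x : α) (l : List α)
    (h : ∀ y ∈ l, before x y = true) :
    PySem.List.insertBy before x l = x :: l := by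
  cases l with
  | nil => simp [PySem.List.insertBy]
  | cons y ys => simp [PySem.List.insertBy, h y (by simp)]

-- stability: inserting into the bucketed form appends at the end of x's bucket
lemma insert_bucketed (ks : List Char) (hs : ks.Pairwise (· < ·)) (x : Char) (ys : List Char)
    (hx : PySem.Chars.lowerChar x ∈ ks) :
    PySem.List.insertBy (fun a b => decide (PySem.Chars.lowerChar a < PySem.Chars.lowerChar b)) x
      (ks.flatMap (fun k => ys.filter (fun c => PySem.Chars.lowerChar c = k)))
    = ks.flatMap (fun k => (ys ++ [x]).filter (fun c => PySem.Chars.lowerChar c = k)) := by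
  induction ks with
  | nil => simp at hx
  | cons k ks' ih =>
      rw [List.pairwise_cons] at hs
      obtain ⟨hk, hs'⟩ := hs
      simp only [List.flatMap_cons]
      by_cases hxk : PySem.Chars.lowerChar x = k
      · -- x lands in this bucket, appended at its end
        have h1 : ∀ y ∈ ys.filter (fun c => PySem.Chars.lowerChar c = k),
            (decide (PySem.Chars.lowerChar x < PySem.Chars.lowerChar y)) = false := by
          intro y hy
          have := (List.mem_filter.mp hy).2
          simp only [decide_eq_true_eq] at this
          simp [hxk, this]
        have h2 : ∀ y ∈ ks'.flatMap (fun k => ys.filter (fun c => PySem.Chars.lowerChar c = k)),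
            (decide (PySem.Chars.lowerChar x < PySem.Chars.lowerChar y)) = true := by
          intro y hy
          obtain ⟨k', hk', hy'⟩ := List.mem_flatMap.mp hy
          have := (List.mem_filter.mp hy').2
          simp only [decide_eq_true_eq] at this
          simp only [decide_eq_true_eq]
          rw [this, hxk]
          exact hk k' hk'
        rw [insertBy_append_not _ _ _ _ h1, insertBy_all_before _ _ _ h2]
        have hb1 : (ys ++ [x]).filter (fun c => PySem.Chars.lowerChar c = k)
            = ys.filter (fun c => PySem.Chars.lowerChar c = k) ++ [x] := by
          simp [List.filter_append, hxk]
        have hb2 : ks'.flatMap (fun k' => (ys ++ [x]).filter (fun c => PySem.Chars.lowerChar c = k'))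
            = ks'.flatMap (fun k' => ys.filter (fun c => PySem.Chars.lowerChar c = k')) := by
          apply List.flatMap_congr
          intro k' hk'
          have hne : PySem.Chars.lowerChar x ≠ k' := by
            rw [hxk]; exact ne_of_lt (hk k' hk')
          simp [List.filter_append, hne]
        rw [hb1, hb2]
        simp
      · -- x lands in a later bucket
        have hx' : PySem.Chars.lowerChar x ∈ ks' := by
          cases List.mem_cons.mp hx with
          | inl h => exact absurd h hxk
          | inr h => exact h
        have hltx : k < PySem.Chars.lowerChar x := hk _ hx'
        have h1 : ∀ y ∈ ys.filter (fun c => PySem.Chars.lowerChar c = k),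
            (decide (PySem.Chars.lowerChar x < PySem.Chars.lowerChar y)) = false := by
          intro y hy
          have := (List.mem_filter.mp hy).2
          simp only [decide_eq_true_eq] at this
          simp only [decide_eq_false_iff_not]
          rw [this]
          exact fun hlt => absurd (lt_trans hltx hlt) (lt_irrefl _)
        rw [insertBy_append_not _ _ _ _ h1, ih hs' hx']
        congr 1
        simp [List.filter_append, hxk]

-- Python's stable sort by a key with values in ks equals concatenating the ks-buckets in key order
lemma sorted_eq_bucketed (ks : List Char) (hs : ks.Pairwise (· < ·)) (xs : List Char)
    (hxs : ∀ c ∈ xs, PySem.Chars.lowerChar c ∈ ks) :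
    PySem.List.sorted xs (fun c => PySem.Chars.lowerChar c) false
    = ks.flatMap (fun k => xs.filter (fun c => PySem.Chars.lowerChar c = k)) := by
  induction xs using List.reverseRecOn with
  | nil => simp [PySem.List.sorted]
  | append_singleton ys x ih =>
      rw [PySem.List.sorted_eq_foldl_insertBy, List.foldl_append, List.foldl_cons, List.foldl_nil,
        ← PySem.List.sorted_eq_foldl_insertBy,
        ih (fun c hc => hxs c (by simp [hc])),
        insert_bucketed ks hs x ys (hxs x (by simp))]

-- A's replacement loop is B's merge of the ordered letters into the non-alpha skeleton
lemma loopA (az : List Char) : ∀ (suffix done : List Char) (i : Nat),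
    i + suffix.countP (fun c => PySem.Chars.isalpha c) ≤ az.length →
    (PySem.List.enumerate suffix (done.length : Int)).foldl
      (fun (s : List Char × Int) ic =>
        if PySem.Chars.isalpha ic.2 then
          (PySem.List.pySetD s.1 ic.1 (PySem.List.pyGetD az s.2 ' '), s.2 + 1)
        else s) (done ++ suffix, (i : Int))
    = (done ++ solveMergeB suffix (az.drop i), ((i + suffix.countP (fun c => PySem.Chars.isalpha c) : Nat) : Int)) := by
  intro suffix
  induction suffix with
  | nil => simp [PySem.List.enumerate, solveMergeB]
  | cons c cs ih =>
      intro done i hle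
      rw [PySem.List.enumerate_cons, List.foldl_cons]
      simp only [List.countP_cons] at hle ⊢
      by_cases hc : PySem.Chars.isalpha c = true
      · have hi : i < az.length := by simp [hc] at hle; omega
        have hdrop : az[i] :: az.drop (i + 1) = az.drop i := (List.drop_eq_getElem_cons hi).symm
        have hm : solveMergeB (c :: cs) (az.drop i) = az[i] :: solveMergeB cs (az.drop (i+1)) := by
          rw [← hdrop]; simp [solveMergeB, hc]
        simp only [hc, if_pos]
        have hset : PySem.List.pySetD (done ++ c :: cs) ((done.length : Int)) az[i] = done ++ az[i] :: cs := by
          rw [PySem.List.pySetD_natCast, List.set_append]; simp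
        have hget : PySem.List.pyGetD az ((i : Int)) ' ' = az[i] := by
          rw [PySem.List.pyGetD_natCast]
          exact List.getD_eq_getElem az ' ' hi
        rw [hget, hset]
        have h1 : done ++ az[i] :: cs = (done ++ [az[i]]) ++ cs := by simp
        have h2 : ((i:Int) + 1) = ((i+1 : Nat) : Int) := by push_cast; ring
        have h3 : ((done.length : Int) + 1) = (((done ++ [az[i]]).length : Int)) := by simp
        rw [h1, h2, h3, ih (done ++ [az[i]]) (i+1) (by simp [hc] at hle ⊢; omega)]
        rw [hm, Prod.mk.injEq]
        exact ⟨by simp, by push_cast; ring⟩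
      · have hm : solveMergeB (c :: cs) (az.drop i) = c :: solveMergeB cs (az.drop i) := by
          simp [solveMergeB, hc]
        simp only [hc, Bool.false_eq_true, if_false]
        have h1 : done ++ c :: cs = (done ++ [c]) ++ cs := by simp
        have h3 : ((done.length : Int) + 1) = (((done ++ [c]).length : Int)) := by simp
        rw [h1, h3, ih (done ++ [c]) i (by simp [hc] at hle ⊢; omega)]
        rw [hm, Prod.mk.injEq]
        exact ⟨by simp, by push_cast; ring⟩

lemma lcKeys_eq_map : lcKeys = (PySem.List.pyRange 0 26 1).map (fun k => Char.ofNat (97 + k).toNat) := by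
  decide

lemma lcKeys_pairwise : lcKeys.Pairwise (· < ·) := by decide

-- ===== VERDICT (by name: the statement is the Claim_ definition above) =====
theorem solve_spec : Claim_equal_solve := by
  unfold Claim_equal_solve Spec_solve
  intro st _
  unfold solve solve_alt
  rw [pairA st.toList [] []]
  simp only [List.nil_append]
  set letters := st.toList.filter (fun c => PySem.Chars.isalpha c) with hletters
  -- A's sorted letters = the bucket concatenation
  have hsort : PySem.List.sorted letters (fun c => PySem.Chars.lowerChar c) false
      = lcKeys.flatMap (fun k => letters.filter (fun c => PySem.Chars.lowerChar c = k)) := by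
    apply sorted_eq_bucketed lcKeys lcKeys_pairwise
    intro c hc
    exact lower_mem_lcKeys c (List.mem_filter.mp hc).2
  -- B's ordered list = the same bucket concatenation
  have hord : (PySem.List.pyRange 0 26 1).foldl
      (fun acc k => acc ++ letters.filter (fun c => PySem.Chars.lowerChar c = Char.ofNat (97 + k).toNat)) []
      = lcKeys.flatMap (fun k => letters.filter (fun c => PySem.Chars.lowerChar c = k)) := by
    rw [PySem.List.foldl_append_eq_flatMap, List.nil_append, lcKeys_eq_map, List.flatMap_map]
  set az := PySem.List.sorted letters (fun c => PySem.Chars.lowerChar c) false with haz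
  -- A's replacement loop
  have hcount : (0:Nat) + st.toList.countP (fun c => PySem.Chars.isalpha c) ≤ az.length := by
    rw [haz, PySem.List.length_sorted, hletters, ← List.countP_eq_length_filter]
    omega
  have hloop := loopA az st.toList [] 0 hcount
  simp only [List.length_nil, Int.natCast_zero, List.nil_append, List.drop_zero] at hloop
  rw [hloop]
  rw [hord, ← hsort]
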